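-- pv_equiv track=rewrite | github.com/Miskecy/united-pool-gpu-script | script.py | _split_keyspace
-- ===== SOURCE A (Python) =====
-- def _split_keyspace(start_hex, end_hex, parts):
--     try:
--         s = int(str(start_hex), 16)
--         e = int(str(end_hex), 16)
--         if e <= s or parts <= 1:
--             return [(str(start_hex), str(end_hex))]
--         length = e - s
--         segments = []
--         for i in range(parts):
--             si = s + (length * i) // parts
--             ei = s + (length * (i + 1)) // parts
--             if i == parts - 1:
--                 ei = e
--             segments.append((f"{si:x}", f"{ei:x}"))
--         return segments
--     except Exception:
--         return [(str(start_hex), str(end_hex))]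
-- ===== SOURCE B (Python) =====
-- def _split_keyspace(start_hex, end_hex, parts):
--     try:
--         s = int(str(start_hex), 16)
--         e = int(str(end_hex), 16)
--         if e <= s or parts <= 1:
--             return [(str(start_hex), str(end_hex))]
--         q, r = divmod(e - s, parts)
--         segments = []
--         lo, acc = s, 0
--         for _ in range(parts):
--             hi = lo + q
--             acc += r
--             if acc >= parts:
--                 acc -= parts
--                 hi += 1
--             segments.append((f"{lo:x}", f"{hi:x}"))
--             lo = hi
--         return segments
--     except Exception:
--         return [(str(start_hex), str(end_hex))]
-- ===== Notes on version B (the rewrite author's own statement) =====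
-- stated objective: alternative
-- what changed: B replaces A's per-iteration closed-form endpoint computation (two multiplications/floor-divisions per segment plus a final-segment override) with an incremental Bresenham-style loop: one divmod up front, then each boundary is obtained from the previous one by adding the quotient and carrying via a running remainder accumulator, no multiplication or division inside the loop and no special case for the last segment.
import Mathlib
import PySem

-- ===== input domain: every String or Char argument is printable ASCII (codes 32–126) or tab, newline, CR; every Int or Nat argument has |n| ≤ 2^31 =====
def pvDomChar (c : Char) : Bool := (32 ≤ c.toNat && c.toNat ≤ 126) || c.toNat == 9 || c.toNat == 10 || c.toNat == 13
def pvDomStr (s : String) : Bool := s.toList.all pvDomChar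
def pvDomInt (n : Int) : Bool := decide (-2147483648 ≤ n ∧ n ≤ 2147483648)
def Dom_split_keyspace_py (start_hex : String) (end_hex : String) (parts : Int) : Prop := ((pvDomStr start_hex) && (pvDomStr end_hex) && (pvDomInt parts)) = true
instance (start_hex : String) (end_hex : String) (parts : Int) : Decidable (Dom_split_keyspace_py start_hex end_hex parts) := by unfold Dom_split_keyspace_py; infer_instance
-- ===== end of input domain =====

-- B replaces A's per-iteration closed-form endpoints (two mul/div each, final-segment override)
-- by an incremental Bresenham-style loop: one divmod up front, then additions and a running
-- remainder accumulator produce each boundary from the previous one; objective: alternative.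

-- ===== PORT A =====
-- A-side helper: exact port of Python's f"{n:x}" (lowercase hex digits, '-' prefix for negatives)
def pyHexA (n : Int) : String :=
  if n < 0 then "-" ++ String.ofList (Nat.toDigits 16 (-n).toNat)
  else String.ofList (Nat.toDigits 16 n.toNat)
def split_keyspace_py (start_hex : String) (end_hex : String) (parts : Int) : List (String × String) :=
  match PySem.Int.ofStrBase? start_hex 16, PySem.Int.ofStrBase? end_hex 16 with
  | some s, some e =>
    if e ≤ s ∨ parts ≤ 1 then [(start_hex, end_hex)]
    else
      let length := e - s
      (PySem.List.pyRange 0 parts 1).foldl (fun segments i =>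
        let si := s + PySem.Int.floordiv (length * i) parts
        let ei := s + PySem.Int.floordiv (length * (i + 1)) parts
        let ei' := if i == parts - 1 then e else ei
        segments ++ [(pyHexA si, pyHexA ei')]) []
  | _, _ => [(start_hex, end_hex)]

-- ===== PORT B =====
-- B-side helper: exact port of Python's f"{n:x}" (lowercase hex digits, '-' prefix for negatives)
def pyHexB (n : Int) : String :=
  if n < 0 then "-" ++ String.ofList (Nat.toDigits 16 (-n).toNat)
  else String.ofList (Nat.toDigits 16 n.toNat)
-- B-side helper: the body of B's for-loop (state = (lo, acc, segments))
def bStep (parts q r : Int) (st : Int × Int × List (String × String)) (_i : Int) : Int × Int × List (String × String) :=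
  let hi := st.1 + q
  let acc := st.2.1 + r
  let hi' := if parts ≤ acc then hi + 1 else hi
  let acc' := if parts ≤ acc then acc - parts else acc
  (hi', acc', st.2.2 ++ [(pyHexB st.1, pyHexB hi')])
def split_keyspace_py_alt (start_hex : String) (end_hex : String) (parts : Int) : List (String × String) :=
  (PySem.Int.ofStrBase? start_hex 16).elim [(start_hex, end_hex)] (fun s =>
    (PySem.Int.ofStrBase? end_hex 16).elim [(start_hex, end_hex)] (fun e =>
      if e ≤ s ∨ parts ≤ 1 then [(start_hex, end_hex)]
      else
        let q := PySem.Int.floordiv (e - s) parts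
        let r := PySem.Int.mod (e - s) parts
        ((PySem.List.pyRange 0 parts 1).foldl (bStep parts q r) (s, 0, [])).2.2))

-- ===== PRECONDITION & SPEC =====
def Spec_split_keyspace_py (start_hex : String) (end_hex : String) (parts : Int) (out : List (String × String)) : Prop := out = split_keyspace_py_alt start_hex end_hex parts
instance (start_hex : String) (end_hex : String) (parts : Int) (out : List (String × String)) : Decidable (Spec_split_keyspace_py start_hex end_hex parts out) := by unfold Spec_split_keyspace_py; infer_instance

-- ===== CLAIM (what is proved, stated in full; the proofs are below) =====
def Claim_equal_split_keyspace_py : Prop := ∀ (start_hex : String) (end_hex : String) (parts : Int), Dom_split_keyspace_py start_hex end_hex parts → Spec_split_keyspace_py start_hex end_hex parts (split_keyspace_py start_hex end_hex parts)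

-- ===== LEMMAS AND PROOFS =====

-- representation lemma: a = m*p + u with 0 ≤ u < p pins down Python floordiv and mod
theorem rep_div_mod (a m u p : Int) (hp : 0 < p) (h : a = m * p + u) (h0 : 0 ≤ u) (h1 : u < p) :
    PySem.Int.floordiv a p = m ∧ PySem.Int.mod a p = u := by
  have hd : PySem.Int.floordiv a p = m := by
    rw [PySem.Int.floordiv_eq_iff_of_pos hp, h]
    have hmp : (m + 1) * p = m * p + p := by ring
    constructor
    · linarith
    · rw [hmp]; linarith
  refine ⟨hd, ?_⟩
  have := PySem.Int.floordiv_mul_add_mod a p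
  rw [hd] at this
  linarith

-- the invariant of B's loop: lo is the closed-form boundary, acc the remainder accumulator
theorem foldB (p L s : Int) (hp : 1 < p) (_hL : 0 < L) :
    ∀ (k : Nat) (i0 : Int) (segs : List (String × String)), 0 ≤ i0 →
    (PySem.List.pyRange i0 (i0 + k) 1).foldl
        (bStep p (PySem.Int.floordiv L p) (PySem.Int.mod L p))
        (s + PySem.Int.floordiv (L * i0) p, PySem.Int.mod ((PySem.Int.mod L p) * i0) p, segs)
    = (s + PySem.Int.floordiv (L * (i0 + k)) p,
       PySem.Int.mod ((PySem.Int.mod L p) * (i0 + k)) p,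
       segs ++ (PySem.List.pyRange i0 (i0 + k) 1).map
         (fun i => (pyHexB (s + PySem.Int.floordiv (L * i) p),
                    pyHexB (s + PySem.Int.floordiv (L * (i + 1)) p)))) := by
  have hp0 : (0:Int) < p := by omega
  set q := PySem.Int.floordiv L p with hq
  set r := PySem.Int.mod L p with hr
  have hLrep : q * p + r = L := PySem.Int.floordiv_mul_add_mod L p
  have hr0 : 0 ≤ r := PySem.Int.mod_nonneg L hp0
  have hr1 : r < p := PySem.Int.mod_lt L hp0
  intro k
  induction k with
  | zero =>
    intro i0 segs _
    simp [PySem.List.pyRange_one_eq_nil (le_refl i0)]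
  | succ k ih =>
    intro i0 segs hi0
    have hcons : PySem.List.pyRange i0 (i0 + (k + 1 : Nat)) 1
        = i0 :: PySem.List.pyRange (i0 + 1) (i0 + (k + 1 : Nat)) 1 :=
      PySem.List.pyRange_one_cons (by push_cast; omega)
    rw [hcons, List.foldl_cons, List.map_cons]
    -- name the accumulator value and the per-step quantities
    set t := PySem.Int.mod (r * i0) p with ht
    have ht0 : 0 ≤ t := PySem.Int.mod_nonneg _ hp0
    have ht1 : t < p := PySem.Int.mod_lt _ hp0
    have htrep : PySem.Int.floordiv (r * i0) p * p + t = r * i0 :=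
      PySem.Int.floordiv_mul_add_mod _ p
    set D := PySem.Int.floordiv (r * i0) p with hD
    -- closed-form boundary at i0 and i0+1, and accumulator at i0+1
    have key0 : L * i0 = (q * i0 + D) * p + t := by linear_combination (-i0) * hLrep - htrep
    have key1 : L * (i0 + 1) = ((q * i0 + D) + q + 1) * p + (t + r - p) := by
      linear_combination (-(i0 + 1)) * hLrep - htrep
    have key1' : L * (i0 + 1) = ((q * i0 + D) + q) * p + (t + r) := by
      linear_combination (-(i0 + 1)) * hLrep - htrep
    have key2 : r * (i0 + 1) = (D + 1) * p + (t + r - p) := by linear_combination -htrep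
    have key2' : r * (i0 + 1) = D * p + (t + r) := by linear_combination -htrep
    have hB0 : PySem.Int.floordiv (L * i0) p = q * i0 + D :=
      (rep_div_mod (L * i0) (q * i0 + D) t p hp0 key0 ht0 ht1).1
    have hstep : (if p ≤ t + r then ((q * i0 + D) + q + 1, t + r - p)
                  else ((q * i0 + D) + q, t + r))
        = (PySem.Int.floordiv (L * (i0 + 1)) p, PySem.Int.mod (r * (i0 + 1)) p) := by
      by_cases hc : p ≤ t + r
      · have h1 := rep_div_mod (L * (i0 + 1)) ((q * i0 + D) + q + 1) (t + r - p) p hp0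
          key1 (by omega) (by omega)
        have h2 := rep_div_mod (r * (i0 + 1)) (D + 1) (t + r - p) p hp0
          key2 (by omega) (by omega)
        simp [hc, h1.1, h2.2]
      · have h1 := rep_div_mod (L * (i0 + 1)) ((q * i0 + D) + q) (t + r) p hp0
          key1' (by omega) (by omega)
        have h2 := rep_div_mod (r * (i0 + 1)) D (t + r) p hp0
          key2' (by omega) (by omega)
        simp [hc, h1.1, h2.2]
    -- evaluate one step of bStep
    have hone : bStep p q r (s + PySem.Int.floordiv (L * i0) p, t, segs) i0
        = (s + PySem.Int.floordiv (L * (i0 + 1)) p, PySem.Int.mod (r * (i0 + 1)) p,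
           segs ++ [(pyHexB (s + PySem.Int.floordiv (L * i0) p),
                     pyHexB (s + PySem.Int.floordiv (L * (i0 + 1)) p))]) := by
      unfold bStep
      by_cases hc : p ≤ t + r
      · have h1 : PySem.Int.floordiv (L * (i0 + 1)) p = (q * i0 + D) + q + 1 := by
          have := hstep; simp [hc] at this; exact this.1.symm
        have h2 : PySem.Int.mod (r * (i0 + 1)) p = t + r - p := by
          have := hstep; simp [hc] at this; exact this.2.symm
        simp only [hB0, h1, h2, hc, if_pos]
        have e1 : s + (q * i0 + D) + q + 1 = s + (q * i0 + D + q + 1) := by ring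
        rw [e1]
      · have h1 : PySem.Int.floordiv (L * (i0 + 1)) p = (q * i0 + D) + q := by
          have := hstep; simp [hc] at this; exact this.1.symm
        have h2 : PySem.Int.mod (r * (i0 + 1)) p = t + r := by
          have := hstep; simp [hc] at this; exact this.2.symm
        simp only [hB0, h1, h2, hc, if_false]
        have e1 : s + (q * i0 + D) + q = s + (q * i0 + D + q) := by ring
        rw [e1]
    rw [hone]
    have hrange : i0 + (k + 1 : Nat) = (i0 + 1) + (k : Nat) := by push_cast; omega
    rw [hrange]
    rw [ih (i0 + 1) _ (by omega)]
    simp [List.append_assoc]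

-- zipping is gone; instead A's loop is turned into a map and matched against foldB's map
-- ===== VERDICT (by name: the statement is the Claim_ definition above) =====
theorem split_keyspace_py_spec : Claim_equal_split_keyspace_py := by
  intro start_hex end_hex parts _
  unfold Spec_split_keyspace_py split_keyspace_py split_keyspace_py_alt
  cases hs : PySem.Int.ofStrBase? start_hex 16 with
  | none => rfl
  | some s =>
  cases he : PySem.Int.ofStrBase? end_hex 16 with
  | none => rfl
  | some e =>
  simp only [Option.elim]
  by_cases hg : e ≤ s ∨ parts ≤ 1
  · simp [hg]
  · simp only [if_neg hg]
    have hse : s < e := by omega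
    have hp : 1 < parts := by omega
    have hp0 : (0:Int) < parts := by omega
    set L := e - s with hL
    have hL0 : (0:Int) < L := by omega
    -- A's append loop = map over range(parts)
    rw [PySem.List.foldl_append_singleton_eq_map, List.nil_append]
    -- B's fold via the invariant (initial state matches the closed forms at i0 = 0)
    have hz1 : PySem.Int.floordiv (L * 0) parts = 0 :=
      (rep_div_mod (L * 0) 0 0 parts hp0 (by ring) le_rfl hp0).1
    have hz2 : PySem.Int.mod ((PySem.Int.mod L parts) * 0) parts = 0 :=
      (rep_div_mod ((PySem.Int.mod L parts) * 0) 0 0 parts hp0 (by ring) le_rfl hp0).2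
    have hcast : (0:Int) + (parts.toNat : Int) = parts := by omega
    have hfold := foldB parts L s hp hL0 parts.toNat 0 [] le_rfl
    rw [hz1, hz2] at hfold
    simp only [add_zero] at hfold
    rw [hcast] at hfold
    rw [hfold]
    simp only [List.nil_append]
    -- the last boundary equals e, so A's override is the identity
    have hlast : s + PySem.Int.floordiv (L * parts) parts = e := by
      have := (rep_div_mod (L * parts) L 0 parts hp0 (by ring) le_rfl hp0).1
      rw [this]; omega
    have hAB : pyHexA = pyHexB := rfl
    rw [hAB]
    apply List.map_congr_left
    intro i hi
    by_cases hie : i = parts - 1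
    · have hb : (i == parts - 1) = true := by simp [hie]
      have h1 : i + 1 = parts := by omega
      simp only [hb, if_true, h1, hlast]
    · have hb : (i == parts - 1) = false := by simp [hie]
      simp only [hb, Bool.false_eq_true, if_false]
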